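-- pv_equiv track=rewrite | github.com/shantanu96/Codechef-Solutions | DS-Course-Foundation/prime-numbers-and-divisibility-of-numbers/DivisorInc.py | findOpr
-- ===== SOURCE A (Python) =====
-- def findDivisors(n):
--     divisors = []
--     i=2
--     while(i*i<=n):
--         if n%i==0:
--             divisors.append(i)
--             divisors.append(int(n/i))
--         i+=1
--     return divisors
--
-- def findOpr(n,m):
--     valuesDic = dict.fromkeys(range(m+1), -1)
--     qu = []
--     qu.append(n)
--     valuesDic[n]=0
--     while len(qu) != 0:
--         value = qu[0]
--         qu.pop(0)
--         if value == m:
--             break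
--         for i in findDivisors(value):
--             pathValue = value + i
--             if((pathValue <= m) and (valuesDic[pathValue]==-1)):
--                 qu.append(pathValue)
--                 valuesDic[pathValue] = valuesDic[value] + 1
--     return valuesDic[m]
-- ===== SOURCE B (Python) =====
-- def findDivisors(n):
--     divisors = []
--     i = 2
--     while i * i <= n:
--         if n % i == 0:
--             divisors.append(i)
--             divisors.append(int(n / i))
--         i += 1
--     return divisors
--
--
-- def findOpr(n, m):
--     # forward DP in numeric order: every edge v -> v+d strictly increases v,
--     # so scanning 0..m once and relaxing outgoing edges replaces A's BFS queue.
--     valuesDic = dict.fromkeys(range(m + 1), -1)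
--     valuesDic[n] = 0
--     for v in range(m + 1):
--         dv = valuesDic[v]
--         if dv == -1:
--             continue
--         for d in findDivisors(v):
--             nv = v + d
--             if nv <= m and (valuesDic[nv] == -1 or valuesDic[nv] > dv + 1):
--                 valuesDic[nv] = dv + 1
--     return valuesDic[m]
-- ===== Notes on version B (the rewrite author's own statement) =====
-- stated objective: alternative
-- what changed: Replaces A's FIFO-queue BFS by a single forward DP sweep over 0..m that min-relaxes each vertex's outgoing edges, valid because every edge v -> v+divisor strictly increases v, so numeric order is a topological order.
import Mathlib
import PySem

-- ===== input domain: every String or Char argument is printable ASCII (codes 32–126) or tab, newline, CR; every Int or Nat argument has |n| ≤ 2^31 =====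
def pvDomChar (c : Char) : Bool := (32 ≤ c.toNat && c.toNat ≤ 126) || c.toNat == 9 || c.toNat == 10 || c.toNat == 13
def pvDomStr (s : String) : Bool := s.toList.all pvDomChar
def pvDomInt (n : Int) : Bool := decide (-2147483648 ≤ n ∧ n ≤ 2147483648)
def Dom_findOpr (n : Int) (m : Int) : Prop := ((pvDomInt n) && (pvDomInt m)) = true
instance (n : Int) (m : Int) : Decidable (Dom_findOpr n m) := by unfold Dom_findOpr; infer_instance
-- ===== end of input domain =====

-- B replaces A's FIFO-queue BFS by a single forward DP sweep over 0..m with min-relaxation,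
-- valid because every edge v -> v+divisor strictly increases v (alternative structure, similar cost).

-- ===== PORT A =====
-- helper: the while loop of findDivisors. `int(n/i)` is ported as PySem.Int.truncdiv,
-- exact here since |n|,|i| ≤ 2^31 < 2^53 on Dom.
def findDivAux (n : Int) (i : Int) (divisors : List Int) : List Int :=
  if _h : i * i ≤ n then
    findDivAux n (i + 1)
      (if PySem.Int.mod n i = 0 then divisors ++ [i, PySem.Int.truncdiv n i] else divisors)
  else divisors
termination_by (n + 1 - i).toNat
decreasing_by
  have hi : 0 < n + 1 - i := by nlinarith [sq_nonneg i, sq_nonneg (i - 1)]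
  omega

def findDivisors (n : Int) : List Int := findDivAux n 2 []

-- the body of A's inner `for i in findDivisors(value)` loop
def bfsStep (m : Int) (value : Int) (s : Std.HashMap Int Int × List Int) (i : Int) :
    Std.HashMap Int Int × List Int :=
  if value + i ≤ m ∧ s.1.getD (value + i) (-1) = -1 then
    (s.1.insert (value + i) (s.1.getD value (-1) + 1), s.2 ++ [value + i])
  else s

-- A's while loop. `fuel` is only a totality guard: each iteration pops one queue element and
-- every enqueue turns a (-1)-entry of the dict permanent, so the loop makes at most
-- 2*(m+1)+1 steps; findOpr passes that many, and the fuel-out branch is proved unreachable.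
def bfsLoop (m : Int) (d : Std.HashMap Int Int) (qu : List Int) (fuel : Nat) : Int :=
  match qu, fuel with
  | [], _ => d.getD m (-1)
  | _ :: _, 0 => d.getD m (-1)
  | value :: rest, fuel + 1 =>
    if value = m then d.getD m (-1)
    else
      let s := (findDivisors value).foldl (bfsStep m value) (d, rest)
      bfsLoop m s.1 s.2 fuel

-- dict.fromkeys(range(m+1), -1) followed by valuesDic[n] = 0 (shared by both Pythons verbatim)
def initDict (n : Int) (m : Int) : Std.HashMap Int Int :=
  ((PySem.List.pyRange 0 (m + 1) 1).foldl (fun d k => d.insert k (-1)) (∅ : Std.HashMap Int Int)).insert n 0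

def findOpr (n : Int) (m : Int) : Int :=
  bfsLoop m (initDict n m) [n] (2 * (m + 1).toNat + 1)

-- ===== PORT B =====
-- body of B's inner relaxation loop (dv read once before the loop, as in Source B)
def relaxStep (m : Int) (v : Int) (dv : Int) (d : Std.HashMap Int Int) (i : Int) :
    Std.HashMap Int Int :=
  if v + i ≤ m ∧ (d.getD (v + i) (-1) = -1 ∨ dv + 1 < d.getD (v + i) (-1)) then
    d.insert (v + i) (dv + 1)
  else d

-- body of B's outer `for v in range(m+1)` loop
def dpBody (m : Int) (d : Std.HashMap Int Int) (v : Int) : Std.HashMap Int Int :=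
  let dv := d.getD v (-1)
  if dv = -1 then d
  else (findDivisors v).foldl (relaxStep m v dv) d

def findOpr_alt (n : Int) (m : Int) : Int :=
  ((PySem.List.pyRange 0 (m + 1) 1).foldl (dpBody m) (initDict n m)).getD m (-1)

-- ===== PRECONDITION & SPEC =====
-- Pre_ excludes exactly the inputs with m < 0 and n ≠ m, on which A (and B alike) raises
-- KeyError: valuesDic has no key m there.
def Pre_findOpr (n : Int) (m : Int) : Prop := 0 ≤ m ∨ n = m
instance (n : Int) (m : Int) : Decidable (Pre_findOpr n m) := by unfold Pre_findOpr; infer_instance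
def pvWitness_findOpr : Int × Int := (4, 8)

def Spec_findOpr (n : Int) (m : Int) (out : Int) : Prop := out = findOpr_alt n m
instance (n : Int) (m : Int) (out : Int) : Decidable (Spec_findOpr n m out) := by unfold Spec_findOpr; infer_instance

-- ===== CLAIM (what is proved, stated in full; the proofs are below) =====
def Claim_equal_findOpr : Prop := ∀ (n : Int) (m : Int), Dom_findOpr n m → Pre_findOpr n m → Spec_findOpr n m (findOpr n m)

-- ===== LEMMAS AND PROOFS =====

-- the getD-view of a dict (default -1, the "undiscovered" marker of both programs)
def gval (d : Std.HashMap Int Int) (x : Int) : Int := d.getD x (-1)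

theorem hm_getD_insert (d : Std.HashMap Int Int) (k v x : Int) :
    (d.insert k v).getD x (-1) = if x = k then v else d.getD x (-1) := by
  rw [Std.HashMap.getD_insert]
  by_cases h : x = k
  · simp [h]
  · simp [h, Ne.symm h]

theorem hm_getD_insert_self (d : Std.HashMap Int Int) (k v : Int) :
    (d.insert k v).getD k (-1) = v := by
  rw [hm_getD_insert, if_pos rfl]

theorem getD_fold_const (l : List Int) (d : Std.HashMap Int Int) (x : Int) :
    (l.foldl (fun d k => d.insert k (-1)) d).getD x (-1) =
      if x ∈ l then -1 else d.getD x (-1) := by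
  induction l generalizing d with
  | nil => simp
  | cons k t ih =>
    simp only [List.foldl_cons, ih, List.mem_cons]
    rcases eq_or_ne x k with rfl | hne
    · simp
    · simp [hm_getD_insert, hne]

theorem gval_initDict (n m x : Int) : gval (initDict n m) x = if x = n then 0 else -1 := by
  unfold gval initDict
  rw [hm_getD_insert]
  rcases eq_or_ne x n with rfl | hne
  · simp
  · simp [hne, getD_fold_const]

-- every element of findDivisors n is ≥ 2, and findDivisors n is empty unless n ≥ 4
theorem mem_findDivAux (n : Int) :
    ∀ (i : Int) (acc : List Int) (x : Int), 2 ≤ i → x ∈ findDivAux n i acc →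
      x ∈ acc ∨ (2 ≤ x ∧ 4 ≤ n) := by
  intro i acc x h2 hx
  induction i, acc using findDivAux.induct n with
  | case1 i acc h ih =>
    rw [findDivAux, dif_pos h] at hx
    rcases ih (by omega) hx with hin | hok
    · have hn4 : 4 ≤ n := by nlinarith
      have hdiv : 2 ≤ PySem.Int.truncdiv n i := by
        have he : PySem.Int.truncdiv n i = n / i := by
          unfold PySem.Int.truncdiv
          rw [← Int.tdiv_eq_ediv_of_nonneg (by omega)]
        rw [he]
        have : i ≤ n / i := by
          rw [Int.le_ediv_iff_mul_le (by omega)]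
          nlinarith
        omega
      split at hin
      · simp only [List.mem_append, List.mem_cons] at hin
        rcases hin with h1 | h2' | h3
        · exact Or.inl h1
        · exact Or.inr ⟨by omega, hn4⟩
        · simp at h3; exact Or.inr ⟨h3 ▸ hdiv, hn4⟩
      · exact Or.inl hin
    · exact Or.inr hok
  | case2 i acc h => rw [findDivAux, dif_neg h] at hx; exact Or.inl hx

theorem mem_findDivisors {n x : Int} (hx : x ∈ findDivisors n) : 2 ≤ x ∧ 4 ≤ n := by
  rcases mem_findDivAux n 2 [] x (by omega) hx with h | h
  · simp at h
  · exact h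

-- the edge relation of both programs: one allowed addition, staying ≤ m
def Edge (m u v : Int) : Prop := v ≤ m ∧ ∃ i ∈ findDivisors u, v = u + i

theorem edge_facts {m u v : Int} (h : Edge m u v) : 4 ≤ u ∧ u + 2 ≤ v ∧ v ≤ m := by
  obtain ⟨hm, i, hi, rfl⟩ := h
  obtain ⟨h2, h4⟩ := mem_findDivisors hi
  exact ⟨h4, by omega, hm⟩

-- v is reachable from n in exactly k additions (all intermediate values ≤ m)
def Reach (n m : Int) : Nat → Int → Prop
  | 0, v => v = n
  | k + 1, v => ∃ u, Reach n m k u ∧ Edge m u v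

-- k is the exact BFS distance of x
def PDist (n m x : Int) (k : Nat) : Prop := Reach n m k x ∧ ∀ j, Reach n m j x → k ≤ j

theorem exists_dist {n m x : Int} : ∀ {j : Nat}, Reach n m j x → ∃ k, PDist n m x k := by
  intro j
  induction j using Nat.strong_induction_on with
  | _ j ih =>
    intro h
    by_cases hc : ∃ j', j' < j ∧ Reach n m j' x
    · rcases hc with ⟨j', hlt, hr⟩
      exact ih j' hlt hr
    · exact ⟨j, h, fun j' hr => by by_contra hlt; exact hc ⟨j', by omega, hr⟩⟩

theorem dist_unique {n m x : Int} {k k' : Nat} (h : PDist n m x k) (h' : PDist n m x k') : k = k' :=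
  le_antisymm (h.2 k' h'.1) (h'.2 k h.1)

theorem dist_pred {n m x : Int} {k : Nat} (h : PDist n m x (k + 1)) :
    ∃ u, PDist n m u k ∧ Edge m u x := by
  obtain ⟨u, hu, he⟩ := h.1
  refine ⟨u, ⟨hu, fun j hj => ?_⟩, he⟩
  have := h.2 (j + 1) ⟨u, hj, he⟩
  omega

-- what both programs return: -1 if m unreachable, else the distance of m
def IsAns (n m r : Int) : Prop :=
  (r = -1 ∧ ∀ k, ¬ Reach n m k m) ∨ (∃ k, PDist n m m k ∧ r = (k : Int))

theorem isAns_unique {n m r r' : Int} (h : IsAns n m r) (h' : IsAns n m r') : r = r' := by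
  rcases h with ⟨rfl, hnr⟩ | ⟨k, hk, rfl⟩
  · rcases h' with ⟨rfl, _⟩ | ⟨k', hk', rfl⟩
    · rfl
    · exact absurd hk'.1 (hnr k')
  · rcases h' with ⟨rfl, hnr'⟩ | ⟨k', hk', rfl⟩
    · exact absurd hk.1 (hnr' k)
    · exact congrArg _ (dist_unique hk hk')

-- ---------- A side: BFS ----------

-- number of still-undiscovered dict entries among the range keys (termination measure)
def ncnt (m : Int) (d : Std.HashMap Int Int) : Nat :=
  (PySem.List.pyRange 0 (m + 1) 1).countP (fun x => d.getD x (-1) == -1)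

theorem ncnt_insert {m k w : Int} {d : Std.HashMap Int Int} (h0 : 0 ≤ k) (h1 : k ≤ m)
    (hold : gval d k = -1) (hw : w ≠ -1) : ncnt m (d.insert k w) + 1 = ncnt m d := by
  unfold ncnt
  have hmem : k ∈ PySem.List.pyRange 0 (m + 1) 1 := by
    rw [PySem.List.mem_pyRange_one]; omega
  have hnd : (PySem.List.pyRange 0 (m + 1) 1).Nodup := PySem.List.nodup_pyRange_one 0 (m+1)
  have hperm := List.perm_cons_erase hmem
  rw [hperm.countP_eq, hperm.countP_eq]
  simp only [List.countP_cons]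
  rw [List.countP_congr (fun x hx => by
    rw [hm_getD_insert, if_neg (((List.Nodup.mem_erase_iff hnd).mp hx).1)])]
  have e1 : ((d.insert k w).getD k (-1) == -1) = false := by
    rw [hm_getD_insert_self]; simpa using hw
  have e2 : (d.getD k (-1) == -1) = true := by simpa using hold
  rw [e1, e2]
  simp

-- the BFS loop invariant
def BInv (n m : Int) (d : Std.HashMap Int Int) (qu : List Int) : Prop :=
  (∀ x, gval d x ≠ -1 → ∃ k, PDist n m x k ∧ gval d x = (k : Int)) ∧
  (∀ x ∈ qu, gval d x ≠ -1) ∧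
  qu.Pairwise (fun a b => gval d a ≤ gval d b) ∧
  (∀ a ∈ qu, ∀ b ∈ qu, gval d a ≤ gval d b + 1) ∧
  (∀ x, gval d x ≠ -1 → x ∉ qu → ∀ i ∈ findDivisors x, x + i ≤ m → gval d (x + i) ≠ -1) ∧
  (∀ x k, PDist n m x k → (∀ h ∈ qu.head?, (k : Int) ≤ gval d h) → gval d x ≠ -1)

-- full description of one pass of A's inner for-loop
theorem foldA (m value l : Int) (hl : 0 ≤ l) :
    ∀ (ds : List Int) (d : Std.HashMap Int Int) (q : List Int),
      (∀ i ∈ ds, 2 ≤ i ∧ 4 ≤ value) → gval d value = l →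
      (gval (ds.foldl (bfsStep m value) (d, q)).1 value = l) ∧
      (∀ x, gval (ds.foldl (bfsStep m value) (d, q)).1 x = gval d x ∨
        (gval d x = -1 ∧ gval (ds.foldl (bfsStep m value) (d, q)).1 x = l + 1 ∧
          (∃ i ∈ ds, x = value + i) ∧ x ≤ m)) ∧
      (∀ i ∈ ds, value + i ≤ m → gval (ds.foldl (bfsStep m value) (d, q)).1 (value + i) ≠ -1) ∧
      (∃ ext, (ds.foldl (bfsStep m value) (d, q)).2 = q ++ ext ∧
        ∀ x, x ∈ ext ↔ (gval d x = -1 ∧ gval (ds.foldl (bfsStep m value) (d, q)).1 x ≠ -1)) ∧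
      (2 * ncnt m (ds.foldl (bfsStep m value) (d, q)).1 +
          (ds.foldl (bfsStep m value) (d, q)).2.length ≤ 2 * ncnt m d + q.length) := by
  intro ds
  induction ds with
  | nil =>
    intro d q _ hv
    refine ⟨hv, fun x => Or.inl rfl, by simp, ⟨[], by simp, by simp⟩, le_rfl⟩
  | cons i t ih =>
    intro d q hds hv
    obtain ⟨h2i, h4v⟩ := hds i List.mem_cons_self
    simp only [List.foldl_cons]
    by_cases htake : value + i ≤ m ∧ d.getD (value + i) (-1) = -1
    · have hstep : bfsStep m value (d, q) i =
          (d.insert (value + i) (l + 1), q ++ [value + i]) := by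
        unfold bfsStep
        simp only
        rw [if_pos htake]
        rw [show d.getD value (-1) = l from hv]
      rw [hstep]
      have hne : value ≠ value + i := by omega
      have hv' : gval (d.insert (value + i) (l + 1)) value = l := by
        unfold gval; rw [hm_getD_insert, if_neg hne]; exact hv
      have hgold : gval d (value + i) = -1 := htake.2
      have hgnew : gval (d.insert (value + i) (l + 1)) (value + i) = l + 1 := by
        unfold gval; rw [hm_getD_insert_self]
      have hother : ∀ x, x ≠ value + i → gval (d.insert (value + i) (l + 1)) x = gval d x := by
        intro x hx; unfold gval; rw [hm_getD_insert, if_neg hx]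
      obtain ⟨ih1, ih2, ih3, ⟨ext, hext, hextiff⟩, ih6⟩ :=
        ih (d.insert (value + i) (l + 1)) (q ++ [value + i])
          (fun j hj => hds j (List.mem_cons_of_mem _ hj)) hv'
      refine ⟨ih1, ?_, ?_, ?_, ?_⟩
      · intro x
        rcases eq_or_ne x (value + i) with rfl | hx
        · rcases ih2 (value + i) with heq | ⟨hbad, -⟩
          · exact Or.inr ⟨hgold, by rw [heq, hgnew], ⟨i, List.mem_cons_self, rfl⟩, htake.1⟩
          · rw [hgnew] at hbad; omega
        · rcases ih2 x with heq | ⟨hold, hnew, ⟨j, hj, hxe⟩, hxm⟩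
          · rw [heq, hother x hx]; exact Or.inl rfl
          · rw [hother x hx] at hold
            exact Or.inr ⟨hold, hnew, ⟨j, List.mem_cons_of_mem _ hj, hxe⟩, hxm⟩
      · intro j hj hjm
        rcases List.mem_cons.mp hj with rfl | hjt
        · rcases ih2 (value + j) with heq | ⟨-, hnew, -, -⟩
          · rw [heq, hgnew]; omega
          · rw [hnew]; omega
        · exact ih3 j hjt hjm
      · refine ⟨(value + i) :: ext, by simpa using hext, ?_⟩
        intro x
        rcases eq_or_ne x (value + i) with rfl | hx
        · simp only [List.mem_cons, true_or, true_iff]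
          refine ⟨hgold, ?_⟩
          rcases ih2 (value + i) with heq | ⟨-, hnew, -, -⟩
          · rw [heq, hgnew]; omega
          · rw [hnew]; omega
        · constructor
          · intro hmem
            rcases List.mem_cons.mp hmem with heq | hmem'
            · exact absurd heq hx
            · obtain ⟨ho, hn⟩ := (hextiff x).mp hmem'
              rw [hother x hx] at ho
              exact ⟨ho, hn⟩
          · rintro ⟨ho, hn⟩
            refine List.mem_cons_of_mem _ ((hextiff x).mpr ⟨?_, hn⟩)
            rw [hother x hx]; exact ho
      · have hkey := ncnt_insert (m := m) (k := value + i) (w := l + 1)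
          (by omega) htake.1 hgold (by omega)
        simp only [List.length_append, List.length_cons, List.length_nil] at ih6 ⊢
        omega
    · have hstep : bfsStep m value (d, q) i = (d, q) := by
        unfold bfsStep
        simp only
        rw [if_neg htake]
      rw [hstep]
      obtain ⟨ih1, ih2, ih3, ⟨ext, hext, hextiff⟩, ih6⟩ :=
        ih d q (fun j hj => hds j (List.mem_cons_of_mem _ hj)) hv
      refine ⟨ih1, ?_, ?_, ⟨ext, hext, hextiff⟩, ih6⟩
      · intro x
        rcases ih2 x with heq | ⟨hold, hnew, ⟨j, hj, hxe⟩, hxm⟩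
        · exact Or.inl heq
        · exact Or.inr ⟨hold, hnew, ⟨j, List.mem_cons_of_mem _ hj, hxe⟩, hxm⟩
      · intro j hj hjm
        rcases List.mem_cons.mp hj with rfl | hjt
        · have hne1 : gval d (value + j) ≠ -1 := fun hc => htake ⟨hjm, hc⟩
          rcases ih2 (value + j) with heq | ⟨-, hnew, -, -⟩
          · rw [heq]; exact hne1
          · rw [hnew]; omega
        · exact ih3 j hjt hjm

theorem emptyAns (n m : Int) (d : Std.HashMap Int Int) (hInv : BInv n m d []) :
    IsAns n m (d.getD m (-1)) := by
  obtain ⟨hB, -, -, -, -, hF⟩ := hInv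
  by_cases hg : gval d m = -1
  · refine Or.inl ⟨hg, fun k hk => ?_⟩
    obtain ⟨km, hkm⟩ := exists_dist hk
    exact hF m km hkm (by simp) hg
  · obtain ⟨k, hd, hval⟩ := hB m hg
    exact Or.inr ⟨k, hd, hval⟩

theorem stepA (n m value : Int) (d : Std.HashMap Int Int) (rest : List Int)
    (hInv : BInv n m d (value :: rest)) (hvm : value ≠ m) :
    BInv n m ((findDivisors value).foldl (bfsStep m value) (d, rest)).1
      ((findDivisors value).foldl (bfsStep m value) (d, rest)).2 ∧
    2 * ncnt m ((findDivisors value).foldl (bfsStep m value) (d, rest)).1 +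
      ((findDivisors value).foldl (bfsStep m value) (d, rest)).2.length + 1 ≤
      2 * ncnt m d + (value :: rest).length := by
  obtain ⟨hB, hQ, hA1, hA2, hC, hF⟩ := hInv
  obtain ⟨kv, hdv, hval⟩ := hB value (hQ value List.mem_cons_self)
  have hkv0 : (0:Int) ≤ (kv : Int) := by positivity
  obtain ⟨f1, f2, f3, ⟨ext, hext, hextiff⟩, f6⟩ :=
    foldA m value (kv : Int) hkv0 (findDivisors value) d rest
      (fun i hi => ⟨(mem_findDivisors hi).1, (mem_findDivisors hi).2⟩) hval
  set s := (findDivisors value).foldl (bfsStep m value) (d, rest) with hs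
  have hmono : ∀ x, gval d x ≠ -1 → gval s.1 x = gval d x := by
    intro x hx
    rcases f2 x with heq | ⟨hold, -⟩
    · exact heq
    · exact absurd hold hx
  have hnewval : ∀ x ∈ ext, gval d x = -1 ∧ gval s.1 x = (kv : Int) + 1 ∧ Edge m value x := by
    intro x hx
    obtain ⟨hold, hnew⟩ := (hextiff x).mp hx
    rcases f2 x with heq | ⟨-, hv1, ⟨i, hi, hxe⟩, hxm⟩
    · rw [heq] at hnew; exact absurd hold hnew
    · exact ⟨hold, hv1, hxm, i, hi, hxe⟩
  have hrest_le : ∀ a ∈ rest, gval d a ≤ (kv : Int) + 1 := by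
    intro a ha
    have := hA2 a (List.mem_cons_of_mem _ ha) value List.mem_cons_self
    omega
  have hhead_le : ∀ b ∈ rest, (kv : Int) ≤ gval d b := by
    intro b hb
    have := (List.pairwise_cons.mp hA1).1 b hb
    omega
  -- the six invariant components for the new state
  have hB' : ∀ x, gval s.1 x ≠ -1 → ∃ k, PDist n m x k ∧ gval s.1 x = (k : Int) := by
    intro x hx
    rcases f2 x with heq | ⟨hold, hnew, ⟨i, hi, hxe⟩, hxm⟩
    · rw [heq] at hx ⊢
      exact hB x hx
    · refine ⟨kv + 1, ⟨⟨value, hdv.1, hxm, i, hi, hxe⟩, ?_⟩, by rw [hnew]; push_cast; ring⟩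
      intro j hj
      by_contra hlt
      obtain ⟨jx, hjx⟩ := exists_dist hj
      have hjxj : jx ≤ j := hjx.2 j hj
      have : gval d x ≠ -1 := by
        refine hF x jx hjx ?_
        intro h hh
        simp only [List.head?_cons, Option.mem_def, Option.some.injEq] at hh
        subst hh
        rw [hval]
        have : jx ≤ kv := by omega
        exact_mod_cast this
      exact this hold
  have hQ' : ∀ x ∈ s.2, gval s.1 x ≠ -1 := by
    rw [hext]
    intro x hx
    rcases List.mem_append.mp hx with hx | hx
    · rw [hmono x (hQ x (List.mem_cons_of_mem _ hx))]
      exact hQ x (List.mem_cons_of_mem _ hx)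
    · rw [(hnewval x hx).2.1]; omega
  have hA1' : s.2.Pairwise (fun a b => gval s.1 a ≤ gval s.1 b) := by
    rw [hext]
    rw [List.pairwise_append]
    refine ⟨?_, ?_, ?_⟩
    · refine ((List.pairwise_cons.mp hA1).2).imp_of_mem ?_
      intro a b ha hb hab
      rw [hmono a (hQ a (List.mem_cons_of_mem _ ha)), hmono b (hQ b (List.mem_cons_of_mem _ hb))]
      exact hab
    · exact List.pairwise_of_forall_mem_list (fun a ha b hb => by
        rw [(hnewval a ha).2.1, (hnewval b hb).2.1])
    · intro a ha b hb
      rw [hmono a (hQ a (List.mem_cons_of_mem _ ha)), (hnewval b hb).2.1]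
      exact hrest_le a ha
  have hA2' : ∀ a ∈ s.2, ∀ b ∈ s.2, gval s.1 a ≤ gval s.1 b + 1 := by
    rw [hext]
    intro a ha b hb
    rcases List.mem_append.mp ha with ha' | ha' <;> rcases List.mem_append.mp hb with hb' | hb'
    · rw [hmono a (hQ a (List.mem_cons_of_mem _ ha')), hmono b (hQ b (List.mem_cons_of_mem _ hb'))]
      exact hA2 a (List.mem_cons_of_mem _ ha') b (List.mem_cons_of_mem _ hb')
    · rw [hmono a (hQ a (List.mem_cons_of_mem _ ha')), (hnewval b hb').2.1]
      have := hrest_le a ha'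
      omega
    · rw [(hnewval a ha').2.1, hmono b (hQ b (List.mem_cons_of_mem _ hb'))]
      have := hhead_le b hb'
      omega
    · rw [(hnewval a ha').2.1, (hnewval b hb').2.1]
      omega
  have hC' : ∀ x, gval s.1 x ≠ -1 → x ∉ s.2 → ∀ i ∈ findDivisors x, x + i ≤ m →
      gval s.1 (x + i) ≠ -1 := by
    intro x hx hnot i hi him
    by_cases hold : gval d x = -1
    · exact absurd (by rw [hext]; exact List.mem_append.mpr (Or.inr ((hextiff x).mpr ⟨hold, hx⟩)))
        hnot
    · by_cases hxv : x = value
      · subst hxv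
        exact f3 i hi him
      · have hnq : x ∉ value :: rest := by
          intro hmem
          rcases List.mem_cons.mp hmem with h | h
          · exact hxv h
          · exact hnot (by rw [hext]; exact List.mem_append.mpr (Or.inl h))
        have := hC x hold hnq i hi him
        rw [hmono _ this]
        exact this
  have hF' : ∀ x k, PDist n m x k → (∀ h ∈ s.2.head?, (k : Int) ≤ gval s.1 h) →
      gval s.1 x ≠ -1 := by
    have holdF : ∀ x k, PDist n m x k → (k : Int) ≤ (kv : Int) → gval s.1 x ≠ -1 := by
      intro x k hd hk
      have : gval d x ≠ -1 := by
        refine hF x k hd ?_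
        intro h hh
        simp only [List.head?_cons, Option.mem_def, Option.some.injEq] at hh
        subst hh
        rw [hval]; exact hk
      rw [hmono x this]; exact this
    intro x k hdist hhead
    rcases hq' : s.2 with ⟨⟩ | ⟨h', t'⟩
    · -- empty queue: prove every reachable vertex is discovered, by strong induction on distance
      have key : ∀ k' x', PDist n m x' k' → gval s.1 x' ≠ -1 := by
        intro k'
        induction k' using Nat.strong_induction_on with
        | _ k' ihk =>
          intro x' hdx
          by_cases hk : (k' : Int) ≤ (kv : Int)
          · exact holdF x' k' hdx hk
          · obtain ⟨k0, rfl⟩ : ∃ k0, k' = k0 + 1 := ⟨k' - 1, by omega⟩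
            obtain ⟨u, hu, he⟩ := dist_pred hdx
            have hu' : gval s.1 u ≠ -1 := ihk k0 (by omega) u hu
            have hunq : u ∉ s.2 := by rw [hq']; exact List.not_mem_nil
            obtain ⟨hm', i', hi', hxe⟩ := he
            rw [hxe]
            exact hC' u hu' hunq i' hi' (hxe ▸ hm')
      exact key k x hdist
    · have hkh : (k : Int) ≤ gval s.1 h' := by
        refine hhead h' ?_
        rw [hq']; simp
      have hmin : ∀ b ∈ s.2, gval s.1 h' ≤ gval s.1 b := by
        rw [hq'] at hA1' ⊢
        intro b hb
        rcases List.mem_cons.mp hb with rfl | hb'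
        · exact le_rfl
        · exact (List.pairwise_cons.mp hA1').1 b hb'
      by_cases hk : (k : Int) ≤ (kv : Int)
      · exact holdF x k hdist hk
      · have hub : gval s.1 h' ≤ (kv : Int) + 1 := by
          have hh'mem : h' ∈ s.2 := by rw [hq']; simp
          rw [hext] at hh'mem
          rcases List.mem_append.mp hh'mem with hh | hh
          · rw [hmono h' (hQ h' (List.mem_cons_of_mem _ hh))]
            exact hrest_le h' hh
          · rw [(hnewval h' hh).2.1]
        have hkeq : k = kv + 1 := by omega
        subst hkeq
        obtain ⟨u, hu, he⟩ := dist_pred hdist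
        have hgu : gval d u ≠ -1 := by
          refine hF u kv hu ?_
          intro h hh
          simp only [List.head?_cons, Option.mem_def, Option.some.injEq] at hh
          subst hh
          rw [hval]
        have hguv : gval s.1 u = (kv : Int) := by
          obtain ⟨ku, hku, hkuval⟩ := hB u hgu
          rw [hmono u hgu, hkuval, dist_unique hku hu]
        have hunq : u ∉ s.2 := by
          intro hmem
          have h1 := hmin u hmem
          rw [hguv] at h1
          push_cast at hkh
          omega
        obtain ⟨hm', i', hi', hxe⟩ := he
        rw [hxe]
        exact hC' u (by rw [hguv]; omega) hunq i' hi' (hxe ▸ hm')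
  refine ⟨⟨hB', hQ', hA1', hA2', hC', hF'⟩, ?_⟩
  simp only [List.length_cons]
  omega

theorem loopA (n m : Int) :
    ∀ (fuel : Nat) (d : Std.HashMap Int Int) (qu : List Int),
      BInv n m d qu → 2 * ncnt m d + qu.length ≤ fuel → IsAns n m (bfsLoop m d qu fuel) := by
  intro fuel
  induction fuel with
  | zero =>
    intro d qu hInv hfuel
    match qu, hfuel with
    | [], _ => exact emptyAns n m d hInv
    | v :: rest, hfuel => simp [List.length_cons] at hfuel
  | succ fuel ih =>
    intro d qu hInv hfuel
    match qu with
    | [] => exact emptyAns n m d hInv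
    | value :: rest =>
      show IsAns n m (bfsLoop m d (value :: rest) (fuel + 1))
      rw [bfsLoop]
      by_cases hvm : value = m
      · rw [if_pos hvm]
        subst hvm
        obtain ⟨hB, hQ, -, -, -, -⟩ := hInv
        obtain ⟨k, hd, hval⟩ := hB value (hQ value List.mem_cons_self)
        exact Or.inr ⟨k, hd, hval⟩
      · rw [if_neg hvm]
        obtain ⟨hInv', hmeas⟩ := stepA n m value d rest hInv hvm
        refine ih _ _ hInv' ?_
        simp only [List.length_cons] at hfuel hmeas
        omega

theorem A_isAns (n m : Int) : IsAns n m (findOpr n m) := by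
  unfold findOpr
  have hg0 : ∀ x, gval (initDict n m) x = if x = n then 0 else -1 := gval_initDict n m
  have hInv : BInv n m (initDict n m) [n] := by
    refine ⟨?_, ?_, ?_, ?_, ?_, ?_⟩
    · intro x hx
      rw [hg0 x] at hx ⊢
      by_cases hxn : x = n
      · subst hxn
        refine ⟨0, ⟨rfl, fun j _ => Nat.zero_le j⟩, by simp⟩
      · simp [hxn] at hx
    · intro x hx
      simp only [List.mem_singleton] at hx
      subst hx
      rw [hg0]; simp
    · simp
    · intro a ha b hb
      simp only [List.mem_singleton] at ha hb
      subst ha; subst hb; omega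
    · intro x hx hnot i hi him
      rw [hg0] at hx
      by_cases hxn : x = n
      · exact absurd (by simp [hxn]) hnot
      · simp [hxn] at hx
    · intro x k hd hh
      have hhn : (k : Int) ≤ gval (initDict n m) n := hh n (by simp)
      rw [hg0 n, if_pos rfl] at hhn
      have hk0 : k = 0 := by omega
      subst hk0
      have hxn : x = n := hd.1
      rw [hg0, if_pos hxn]; omega
  have hmeas : 2 * ncnt m (initDict n m) + ([n] : List Int).length ≤ 2 * (m + 1).toNat + 1 := by
    have : ncnt m (initDict n m) ≤ (m + 1).toNat := by
      unfold ncnt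
      calc (PySem.List.pyRange 0 (m + 1) 1).countP _ ≤ (PySem.List.pyRange 0 (m + 1) 1).length :=
            List.countP_le_length
        _ = (m + 1 - 0).toNat := PySem.List.length_pyRange_one 0 (m + 1)
        _ = (m + 1).toNat := by omega
    simp only [List.length_singleton]
    omega
  exact loopA n m (2 * (m + 1).toNat + 1) (initDict n m) [n] hInv hmeas

-- ---------- B side: forward DP ----------

-- distances provable using only already-processed sources u < v
def SReach (n m v x : Int) (k : Nat) : Prop :=
  (x = n ∧ k = 0) ∨ (∃ u ku, u < v ∧ PDist n m u ku ∧ Edge m u x ∧ k = ku + 1)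

def SDist (n m v x : Int) (k : Nat) : Prop :=
  SReach n m v x k ∧ ∀ j, SReach n m v x j → k ≤ j

theorem sreach_reach {n m v x : Int} {k : Nat} (h : SReach n m v x k) : Reach n m k x := by
  rcases h with ⟨rfl, rfl⟩ | ⟨u, ku, _, hd, he, rfl⟩
  · rfl
  · exact ⟨u, hd.1, he⟩

-- below v all candidate distances have been merged, so SDist is the true distance
theorem dist_to_sreach {n m v x : Int} {k : Nat} (hxv : x < v + 1) (h : PDist n m x k) :
    SReach n m v x k := by
  match k with
  | 0 => exact Or.inl ⟨h.1, rfl⟩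
  | k + 1 =>
    obtain ⟨u, hu, he⟩ := dist_pred h
    have := edge_facts he
    exact Or.inr ⟨u, k, by omega, hu, he, rfl⟩

theorem sdist_to_dist {n m v x : Int} {k : Nat} (hxv : x ≤ v) (h : SDist n m v x k) :
    PDist n m x k := by
  refine ⟨sreach_reach h.1, fun j hj => ?_⟩
  obtain ⟨jx, hjx⟩ := exists_dist hj
  have h1 : k ≤ jx := h.2 jx (dist_to_sreach (by omega) hjx)
  have h2 : jx ≤ j := hjx.2 j hj
  omega

-- the DP loop invariant: entries hold exactly the so-far-provable least distances
def Jinv (n m v : Int) (d : Std.HashMap Int Int) : Prop :=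
  ∀ x, (gval d x = -1 ∧ ∀ k, ¬ SReach n m v x k) ∨
    (∃ k, SDist n m v x k ∧ gval d x = (k : Int))

-- full description of one pass of B's inner relaxation loop
theorem relax_spec (m v l : Int) (hl : 0 ≤ l) :
    ∀ (ds : List Int) (d : Std.HashMap Int Int) (x : Int),
      gval (ds.foldl (relaxStep m v l) d) x =
        if (∃ i ∈ ds, x = v + i) ∧ x ≤ m ∧ (gval d x = -1 ∨ l + 1 < gval d x) then l + 1
        else gval d x := by
  intro ds
  induction ds with
  | nil => intro d x; simp
  | cons i t ih =>
    intro d x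
    simp only [List.foldl_cons]
    rw [ih]
    by_cases hx : x = v + i
    · by_cases hg : x ≤ m ∧ (gval d x = -1 ∨ l + 1 < gval d x)
      · have hd1 : relaxStep m v l d i = d.insert x (l + 1) := by
          unfold relaxStep
          unfold gval at hg
          rw [← hx, if_pos hg]
        rw [hd1]
        have hgx : gval (d.insert x (l + 1)) x = l + 1 := by
          unfold gval; rw [hm_getD_insert_self]
        rw [if_neg, if_pos]
        · exact hgx
        · exact ⟨⟨i, List.mem_cons_self, hx⟩, hg⟩
        · rw [hgx]; rintro ⟨-, -, h | h⟩ <;> omega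
      · have hd1 : relaxStep m v l d i = d := by
          unfold relaxStep
          unfold gval at hg
          rw [← hx, if_neg hg]
        rw [hd1, if_neg, if_neg]
        · rintro ⟨-, hrest⟩; exact hg hrest
        · rintro ⟨-, hrest⟩; exact hg hrest
    · have hd1 : gval (relaxStep m v l d i) x = gval d x := by
        unfold relaxStep gval
        split
        · rw [hm_getD_insert, if_neg hx]
        · rfl
      rw [hd1]
      by_cases hc : (∃ j ∈ t, x = v + j) ∧ x ≤ m ∧ (gval d x = -1 ∨ l + 1 < gval d x)
      · rw [if_pos hc, if_pos]
        obtain ⟨⟨j, hj, hxe⟩, hrest⟩ := hc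
        exact ⟨⟨j, List.mem_cons_of_mem _ hj, hxe⟩, hrest⟩
      · rw [if_neg hc, if_neg]
        rintro ⟨⟨j, hj, hxe⟩, hrest⟩
        rcases List.mem_cons.mp hj with rfl | hjt
        · exact hx hxe
        · exact hc ⟨⟨j, hjt, hxe⟩, hrest⟩

theorem sreach_mono {n m v v' x : Int} {k : Nat} (hvv : v ≤ v') (h : SReach n m v x k) :
    SReach n m v' x k := by
  rcases h with hl | ⟨u, ku, hu, hd, he, rfl⟩
  · exact Or.inl hl
  · exact Or.inr ⟨u, ku, by omega, hd, he, rfl⟩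

theorem sreach_succ_iff_unreach {n m v x : Int} {j : Nat} (h : ∀ k, ¬ Reach n m k v) :
    SReach n m (v + 1) x j ↔ SReach n m v x j := by
  constructor
  · rintro (hl | ⟨u, ku, hu, hd, he, rfl⟩)
    · exact Or.inl hl
    · rcases eq_or_lt_of_le (by omega : u ≤ v) with rfl | hlt
      · exact absurd hd.1 (h ku)
      · exact Or.inr ⟨u, ku, hlt, hd, he, rfl⟩
  · exact sreach_mono (by omega)

theorem sreach_succ_iff {n m v x : Int} {j kv : Nat} (hPDv : PDist n m v kv) :
    SReach n m (v + 1) x j ↔ SReach n m v x j ∨ (Edge m v x ∧ j = kv + 1) := by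
  constructor
  · rintro (hl | ⟨u, ku, hu, hd, he, rfl⟩)
    · exact Or.inl (Or.inl hl)
    · rcases eq_or_lt_of_le (by omega : u ≤ v) with rfl | hlt
      · exact Or.inr ⟨he, by rw [dist_unique hd hPDv]⟩
      · exact Or.inl (Or.inr ⟨u, ku, hlt, hd, he, rfl⟩)
  · rintro (hs | ⟨he, rfl⟩)
    · exact sreach_mono (by omega) hs
    · exact Or.inr ⟨v, kv, by omega, hPDv, he, rfl⟩

theorem jinv_transfer {n m v d} (hJ : Jinv n m v d)
    (hiff : ∀ x j, SReach n m (v + 1) x j ↔ SReach n m v x j) : Jinv n m (v + 1) d := by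
  intro x
  rcases hJ x with ⟨h1, h2⟩ | ⟨k, hsd, hval⟩
  · exact Or.inl ⟨h1, fun k hs => h2 k ((hiff x k).mp hs)⟩
  · exact Or.inr ⟨k, ⟨(hiff x k).mpr hsd.1, fun j hj => hsd.2 j ((hiff x j).mp hj)⟩, hval⟩

theorem stepB (n m v : Int) (d : Std.HashMap Int Int) (hJ : Jinv n m v d) :
    Jinv n m (v + 1) (dpBody m d v) := by
  unfold dpBody
  by_cases hdv : d.getD v (-1) = -1
  · rw [if_pos hdv]
    have hnos : ∀ k, ¬ SReach n m v v k := by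
      rcases hJ v with ⟨-, h2⟩ | ⟨k, -, hval⟩
      · exact h2
      · exact absurd hval (by rw [show gval d v = d.getD v (-1) from rfl, hdv]; intro h; omega)
    have hunreach : ∀ k, ¬ Reach n m k v := by
      intro k hk
      obtain ⟨kv, hkv⟩ := exists_dist hk
      exact hnos kv (dist_to_sreach (by omega) hkv)
    exact jinv_transfer hJ (fun x j => sreach_succ_iff_unreach hunreach)
  · rw [if_neg hdv]
    have hex2 : ∃ k, SDist n m v v k ∧ gval d v = (k : Int) := by
      rcases hJ v with ⟨h1, -⟩ | h
      · exact absurd h1 (by simpa [gval] using hdv)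
      · exact h
    obtain ⟨kv, hsdv, hvalv⟩ := hex2
    have hPDv : PDist n m v kv := sdist_to_dist le_rfl hsdv
    have hvv : gval d v = (kv : Int) := hvalv
    have hdvv : d.getD v (-1) = (kv : Int) := hvalv
    intro x
    have hrs := relax_spec m v (d.getD v (-1)) (by rw [hdvv]; positivity) (findDivisors v) d x
    by_cases hedge : Edge m v x
    · obtain ⟨hxm, hex⟩ := hedge
      rcases hJ x with ⟨hg1, hno⟩ | ⟨kx, hsdx, hvalx⟩
      · have hC : ((∃ i ∈ findDivisors v, x = v + i) ∧ x ≤ m ∧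
            (gval d x = -1 ∨ d.getD v (-1) + 1 < gval d x)) := by
          obtain ⟨i, hi, hxe⟩ := hex
          exact ⟨⟨i, hi, hxe⟩, hxm, Or.inl hg1⟩
        rw [show (gval ((findDivisors v).foldl (relaxStep m v (d.getD v (-1))) d) x =
            d.getD v (-1) + 1) from by rw [hrs, if_pos hC]]
        refine Or.inr ⟨kv + 1, ⟨?_, ?_⟩, by rw [hdvv]; push_cast; ring⟩
        · exact (sreach_succ_iff hPDv).mpr (Or.inr ⟨⟨hxm, hex⟩, rfl⟩)
        · intro j hj
          rcases (sreach_succ_iff hPDv).mp hj with hs | ⟨-, rfl⟩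
          · exact absurd hs (hno j)
          · exact le_rfl
      · have hxnn : (0:Int) ≤ (kx : Int) := by positivity
        by_cases hlt : (kv : Int) + 1 < (kx : Int)
        · have hC : ((∃ i ∈ findDivisors v, x = v + i) ∧ x ≤ m ∧
              (gval d x = -1 ∨ d.getD v (-1) + 1 < gval d x)) := by
            obtain ⟨i, hi, hxe⟩ := hex
            exact ⟨⟨i, hi, hxe⟩, hxm, Or.inr (by rw [hvalx, hdvv]; exact hlt)⟩
          rw [show (gval ((findDivisors v).foldl (relaxStep m v (d.getD v (-1))) d) x =
              d.getD v (-1) + 1) from by rw [hrs, if_pos hC]]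
          refine Or.inr ⟨kv + 1, ⟨?_, ?_⟩, by rw [hdvv]; push_cast; ring⟩
          · exact (sreach_succ_iff hPDv).mpr (Or.inr ⟨⟨hxm, hex⟩, rfl⟩)
          · intro j hj
            rcases (sreach_succ_iff hPDv).mp hj with hs | ⟨-, rfl⟩
            · have := hsdx.2 j hs
              omega
            · exact le_rfl
        · have hC : ¬((∃ i ∈ findDivisors v, x = v + i) ∧ x ≤ m ∧
              (gval d x = -1 ∨ d.getD v (-1) + 1 < gval d x)) := by
            rintro ⟨-, -, hbad | hbad⟩
            · rw [hvalx] at hbad; omega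
            · rw [hvalx, hdvv] at hbad; omega
          rw [show (gval ((findDivisors v).foldl (relaxStep m v (d.getD v (-1))) d) x =
              gval d x) from by rw [hrs, if_neg hC]]
          refine Or.inr ⟨kx, ⟨(sreach_succ_iff hPDv).mpr (Or.inl hsdx.1), ?_⟩, hvalx⟩
          intro j hj
          rcases (sreach_succ_iff hPDv).mp hj with hs | ⟨-, rfl⟩
          · exact hsdx.2 j hs
          · omega
    · have hC : ¬((∃ i ∈ findDivisors v, x = v + i) ∧ x ≤ m ∧
          (gval d x = -1 ∨ d.getD v (-1) + 1 < gval d x)) := by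
        rintro ⟨hex, hxm, -⟩
        exact hedge ⟨hxm, hex⟩
      have hgx : gval ((findDivisors v).foldl (relaxStep m v (d.getD v (-1))) d) x = gval d x := by
        rw [hrs, if_neg hC]
      have hiff : ∀ j, SReach n m (v + 1) x j ↔ SReach n m v x j := by
        intro j
        rw [sreach_succ_iff hPDv]
        constructor
        · rintro (hs | ⟨he, -⟩)
          · exact hs
          · exact absurd he hedge
        · exact Or.inl
      rcases hJ x with ⟨h1, h2⟩ | ⟨k, hsd, hval⟩
      · exact Or.inl ⟨by rw [hgx]; exact h1, fun k hs => h2 k ((hiff k).mp hs)⟩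
      · exact Or.inr ⟨k, ⟨(hiff k).mpr hsd.1, fun j hj => hsd.2 j ((hiff j).mp hj)⟩, by rw [hgx]; exact hval⟩

theorem loopB (n m : Int) :
    ∀ (len : Nat) (v : Int) (d : Std.HashMap Int Int), Jinv n m v d →
      Jinv n m (v + (len : Int)) ((PySem.List.pyRange v (v + (len : Int)) 1).foldl (dpBody m) d) := by
  intro len
  induction len with
  | zero =>
    intro v d hJ
    have he : PySem.List.pyRange v (v + ((0:Nat) : Int)) 1 = [] := by
      rw [PySem.List.pyRange_one]; simp
    rw [he]
    simpa using hJ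
  | succ len ih =>
    intro v d hJ
    have hlt : v < v + (((len + 1 : Nat)) : Int) := by push_cast; omega
    rw [PySem.List.pyRange_one_cons hlt, List.foldl_cons]
    have hcast : v + (((len + 1 : Nat)) : Int) = (v + 1) + ((len : Nat) : Int) := by
      push_cast; ring
    rw [hcast]
    exact ih (v + 1) (dpBody m d v) (stepB n m v d hJ)

theorem jinv_init (n m : Int) : Jinv n m 0 (initDict n m) := by
  intro x
  rcases eq_or_ne x n with rfl | hne
  · refine Or.inr ⟨0, ⟨Or.inl ⟨rfl, rfl⟩, fun j _ => Nat.zero_le j⟩, ?_⟩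
    rw [gval_initDict]; simp
  · refine Or.inl ⟨by rw [gval_initDict]; simp [hne], ?_⟩
    rintro k (⟨rfl, -⟩ | ⟨u, ku, hu, hd, he, -⟩)
    · exact hne rfl
    · have := edge_facts he
      omega

theorem B_isAns (n m : Int) (hm : 0 ≤ m) : IsAns n m (findOpr_alt n m) := by
  have hJ := loopB n m (m + 1).toNat 0 (initDict n m) (jinv_init n m)
  rw [show ((0:Int) + (((m + 1).toNat : Nat) : Int)) = m + 1 by omega] at hJ
  unfold findOpr_alt
  rcases hJ m with ⟨hg, hno⟩ | ⟨k, hsd, hval⟩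
  · refine Or.inl ⟨hg, fun k hk => ?_⟩
    obtain ⟨km, hkm⟩ := exists_dist hk
    exact hno km (dist_to_sreach (by omega) hkm)
  · exact Or.inr ⟨k, sdist_to_dist (by omega) hsd, hval⟩

-- ===== VERDICT (by name: the statement is the Claim_ definition above) =====
theorem findOpr_spec : Claim_equal_findOpr := by
  intro n m _hdom hpre
  unfold Spec_findOpr
  by_cases hm : 0 ≤ m
  · exact isAns_unique (A_isAns n m) (B_isAns n m hm)
  · -- here Pre_ forces n = m (< 0): both sides return 0 directly
    rcases hpre with hm' | hnm
    · exact absurd hm' hm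
    · -- n = m < 0: A pops m immediately and returns valuesDic[m] = 0; B's range is empty
      subst hnm
      have h0 : (n + 1).toNat = 0 := by omega
      have hr : PySem.List.pyRange 0 (n + 1) 1 = [] := by
        rw [PySem.List.pyRange_one]
        have he : (n + 1 - 0).toNat = 0 := by omega
        rw [he]
        simp
      unfold findOpr findOpr_alt
      rw [hr, h0, List.foldl_nil]
      have hone : (2 * 0 + 1 : Nat) = 0 + 1 := rfl
      rw [hone, bfsLoop]
      simp
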